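-- pv_equiv track=rewrite | github.com/mericalp/bash_scripting | python/day45.py | analyse_string
-- ===== SOURCE A (Python) =====
-- def analyse_string(str):
--     special_characters = "#$%&'()*+,-./:;<=>?@[\]^_`{|}~"
--     special_char = ""
--     num_special_character = 0
--     num_words = 0
--     total_char_count = 0
--
--     for i in str:
--         if i in special_characters:
--             special_char+=i
--             #num_special_character+=1
--
--     words= str.split()
--     num_words = len(words)
--
--     for word in words:
--         total_char_count+=len(word)
--
--     result = {
--         "special characters": len(special_char),
--         "words": num_words,
--         "total characters": total_char_count
--     }
--
--     return result
-- ===== SOURCE B (Python) =====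
-- def analyse_string(str):
--     specials = "#$%&'()*+,-./:;<=>?@[\]^_`{|}~"
--     num_special = 0
--     non_ws = 0
--     num_words = 0
--     in_word = False
--     for ch in str:
--         if ch in specials:
--             num_special += 1
--         if ch.isspace():
--             in_word = False
--         else:
--             non_ws += 1
--             if not in_word:
--                 num_words += 1
--             in_word = True
--     return {
--         "special characters": num_special,
--         "words": num_words,
--         "total characters": non_ws,
--     }
-- ===== Notes on version B (the rewrite author's own statement) =====
-- stated objective: alternative
-- what changed: Replaces A's three separate passes (building a string of special chars, str.split() into a word list, then summing word lengths) with one single loop over the characters keeping three integer counters and an in-word flag; no intermediate string or word list is built.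
import Mathlib
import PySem

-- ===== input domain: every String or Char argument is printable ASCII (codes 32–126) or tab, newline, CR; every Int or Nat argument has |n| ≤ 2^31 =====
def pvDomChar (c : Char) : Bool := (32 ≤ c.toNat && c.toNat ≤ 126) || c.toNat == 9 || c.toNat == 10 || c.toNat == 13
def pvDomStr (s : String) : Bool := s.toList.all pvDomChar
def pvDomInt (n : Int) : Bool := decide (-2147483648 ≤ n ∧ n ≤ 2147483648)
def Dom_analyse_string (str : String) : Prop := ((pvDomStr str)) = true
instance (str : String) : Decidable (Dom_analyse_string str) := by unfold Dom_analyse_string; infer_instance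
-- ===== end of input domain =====

-- B replaces A's three passes (collect special chars, split() into words, sum word lengths)
-- by one single loop with three counters and an in-word flag; same return value.

-- the literal special_characters string from the Python source (both A and B use it)
def pvSpecials : List Char := "#$%&'()*+,-./:;<=>?@[\\]^_`{|}~".toList

-- ===== PORT A =====
def analyse_string (str : String) : List (String × Int) :=
  let specials := pvSpecials
  let special_char := str.toList.foldl
    (fun s c => if PySem.Chars.isIn [c] specials then s ++ [c] else s) ([] : List Char)
  let words := PySem.Chars.split₀ str.toList
  let num_words : Int := words.length
  let total_char_count := words.foldl (fun t w => t + (w.length : Int)) (0 : Int)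
  [("special characters", (special_char.length : Int)),
   ("words", num_words),
   ("total characters", total_char_count)]

-- ===== PORT B =====
def analyse_string_alt (str : String) : List (String × Int) :=
  let specials := pvSpecials
  let st := str.toList.foldl
    (fun (st : Int × Int × Int × Bool) c =>
      let sp := if PySem.Chars.isIn [c] specials then st.1 + 1 else st.1
      if PySem.Chars.isspace c then (sp, st.2.1, st.2.2.1, false)
      else (sp, st.2.1 + 1, if st.2.2.2 then st.2.2.1 else st.2.2.1 + 1, true))
    ((0, 0, 0, false) : Int × Int × Int × Bool)
  [("special characters", st.1),
   ("words", st.2.2.1),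
   ("total characters", st.2.1)]

-- ===== PRECONDITION & SPEC =====
def Spec_analyse_string (str : String) (out : List (String × Int)) : Prop := out = analyse_string_alt str
instance (str : String) (out : List (String × Int)) : Decidable (Spec_analyse_string str out) := by unfold Spec_analyse_string; infer_instance

-- ===== CLAIM (what is proved, stated in full; the proofs are below) =====
def Claim_equal_analyse_string : Prop := ∀ (str : String), Dom_analyse_string str → Spec_analyse_string str (analyse_string str)

-- ===== LEMMAS AND PROOFS =====

-- number of special characters in l
def pvSpec (l : List Char) : Nat := l.countP (fun c => PySem.Chars.isIn [c] pvSpecials)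

-- count of non-whitespace characters
def pvNonws (l : List Char) : Nat := l.countP (fun c => !PySem.Chars.isspace c)

-- word count of a character list given whether we are currently inside a word
def pvWc : List Char → Bool → Nat
  | [], _ => 0
  | c :: r, inW =>
    if PySem.Chars.isspace c then pvWc r false
    else (if inW then 0 else 1) + pvWc r true

-- A's first loop builds a list; its length is a countP
theorem specialList_length (l : List Char) : ∀ (init : List Char),
    (l.foldl (fun s c => if PySem.Chars.isIn [c] pvSpecials then s ++ [c] else s) init).length
      = init.length + pvSpec l := by
  induction l with
  | nil => intro init; simp [pvSpec]
  | cons c r ih =>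
    intro init
    by_cases h : PySem.Chars.isIn [c] pvSpecials <;> simp [h, ih, pvSpec] <;> omega

-- A's third loop sums word lengths
theorem foldl_len_sum (ws : List (List Char)) : ∀ (a : Int),
    ws.foldl (fun t w => t + (w.length : Int)) a = a + ((ws.map List.length).sum : Nat) := by
  induction ws with
  | nil => intro a; simp
  | cons w r ih => intro a; simp [ih]; push_cast; ring

-- number of words produced by split₀.go
theorem go_length (rest : List Char) : ∀ (cur : List Char) (acc : List (List Char)),
    (PySem.Chars.split₀.go rest cur acc).length
      = acc.length + (if cur.isEmpty then 0 else 1) + pvWc rest (!cur.isEmpty) := by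
  induction rest with
  | nil =>
    intro cur acc
    simp [PySem.Chars.split₀.go, pvWc]
    split_ifs <;> simp
  | cons c r ih =>
    intro cur acc
    simp only [PySem.Chars.split₀.go, pvWc]
    by_cases hs : PySem.Chars.isspace c
    · by_cases hc : cur.isEmpty <;> simp [hs, hc, ih] <;> omega
    · by_cases hc : cur.isEmpty <;> simp [hs, hc, ih] <;> omega

-- total characters in the words produced by split₀.go
theorem go_sum (rest : List Char) : ∀ (cur : List Char) (acc : List (List Char)),
    ((PySem.Chars.split₀.go rest cur acc).map List.length).sum
      = (acc.map List.length).sum + cur.length + pvNonws rest := by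
  induction rest with
  | nil =>
    intro cur acc
    simp [PySem.Chars.split₀.go, pvNonws]
    split_ifs with h
    · simp_all
    · simp
  | cons c r ih =>
    intro cur acc
    simp only [PySem.Chars.split₀.go]
    by_cases hs : PySem.Chars.isspace c
    · by_cases hc : cur.isEmpty <;>
        simp [hs, hc, ih, pvNonws, List.isEmpty_iff] <;>
          simp_all [List.isEmpty_iff] <;> omega
    · simp [hs, ih, pvNonws]
      omega

-- the in-word flag at the end of B's fold
def pvLastInW : List Char → Bool → Bool
  | [], inW => inW
  | c :: r, _ => pvLastInW r (!PySem.Chars.isspace c)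

-- B's single fold, component by component
theorem bfold_spec (l : List Char) : ∀ (sp nonws nw : Int) (inW : Bool),
    l.foldl
      (fun (st : Int × Int × Int × Bool) c =>
        if PySem.Chars.isspace c then
          (if PySem.Chars.isIn [c] pvSpecials then st.1 + 1 else st.1, st.2.1, st.2.2.1, false)
        else
          (if PySem.Chars.isIn [c] pvSpecials then st.1 + 1 else st.1, st.2.1 + 1,
            if st.2.2.2 then st.2.2.1 else st.2.2.1 + 1, true))
      (sp, nonws, nw, inW)
      = (sp + (pvSpec l : Int), nonws + (pvNonws l : Int), nw + (pvWc l inW : Int),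
         pvLastInW l inW) := by
  induction l with
  | nil => intro sp nonws nw inW; simp [pvSpec, pvNonws, pvWc, pvLastInW]
  | cons c r ih =>
    intro sp nonws nw inW
    by_cases hs : PySem.Chars.isspace c <;>
      by_cases hp : PySem.Chars.isIn [c] pvSpecials <;>
        by_cases hw : inW = true <;>
          simp [hs, hp, hw, ih, pvSpec, pvNonws, pvWc, pvLastInW] <;> omega

-- ===== VERDICT (by name: the statement is the Claim_ definition above) =====
theorem analyse_string_spec : Claim_equal_analyse_string := by
  intro s _
  show analyse_string s = analyse_string_alt s
  simp only [analyse_string, analyse_string_alt, PySem.Chars.split₀]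
  simp only [specialList_length, foldl_len_sum, go_length, go_sum]
  rw [bfold_spec]
  simp
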